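-- pv_equiv track=rewrite | github.com/callmewenhao/leetcode | 基础算法精讲/动态规划/子序列子数组DP/longestObstacleCourseAtEachPosition.py | longestObstacleCourseAtEachPosition
-- ===== SOURCE A (Python) =====
-- from typing import List
--
-- def longestObstacleCourseAtEachPosition(obstacles: List[int]) -> List[int]:
--     n = len(obstacles)
--     f = [0] * n
--     for i in range(n):
--         for j in range(i):
--             if obstacles[j] <= obstacles[i]:
--                 f[i] = max(f[i], f[j])
--         f[i] += 1
--     return f
-- ===== SOURCE B (Python) =====
-- from bisect import bisect_right
-- from typing import List
--
-- def longestObstacleCourseAtEachPosition(obstacles: List[int]) -> List[int]: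
--     # Patience sorting: tails[k] = smallest possible last element of a
--     # non-decreasing subsequence of length k+1 among the processed prefix.
--     tails = []
--     ans = []
--     for x in obstacles:
--         p = bisect_right(tails, x)
--         if p == len(tails):
--             tails.append(x)
--         else:
--             tails[p] = x
--         ans.append(p + 1)
--     return ans
-- ===== Notes on version B (the rewrite author's own statement) =====
-- stated objective: faster
-- what changed: Replaced the quadratic per-index DP scan with patience sorting: a sorted tails array plus bisect_right gives each element's longest-non-decreasing-subsequence length directly.
import Mathlib
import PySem

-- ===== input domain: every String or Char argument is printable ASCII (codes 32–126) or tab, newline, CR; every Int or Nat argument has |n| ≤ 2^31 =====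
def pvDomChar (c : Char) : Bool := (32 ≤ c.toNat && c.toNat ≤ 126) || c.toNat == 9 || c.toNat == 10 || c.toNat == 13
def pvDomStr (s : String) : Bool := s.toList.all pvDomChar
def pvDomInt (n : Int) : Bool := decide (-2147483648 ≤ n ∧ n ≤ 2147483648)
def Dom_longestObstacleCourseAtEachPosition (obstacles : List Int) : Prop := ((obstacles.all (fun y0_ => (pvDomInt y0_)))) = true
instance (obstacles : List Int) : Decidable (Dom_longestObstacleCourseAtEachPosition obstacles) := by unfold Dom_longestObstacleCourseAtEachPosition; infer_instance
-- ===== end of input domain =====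

-- B replaces A's quadratic per-index DP scan with patience sorting (sorted tails + bisect_right); objective: faster (asymptotic).

-- ===== PORT A =====
def longestObstacleCourseAtEachPosition (obstacles : List Int) : List Int :=
  let n := obstacles.length
  (PySem.List.pyRange 0 (n : Int) 1).foldl (fun f i =>
    let f1 := (PySem.List.pyRange 0 i 1).foldl (fun f j =>
      if PySem.List.pyGetD obstacles j 0 ≤ PySem.List.pyGetD obstacles i 0 then
        f.set i.toNat (max (PySem.List.pyGetD f i 0) (PySem.List.pyGetD f j 0))
      else f) f
    f1.set i.toNat (PySem.List.pyGetD f1 i 0 + 1))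
    (List.replicate n 0)

-- ===== PORT B =====
-- port of the stdlib call bisect.bisect_right on a sorted list: number of leading elements ≤ x
def pvBisectRight (g : List Int) (x : Int) : Nat :=
  (g.takeWhile (fun t => decide (t ≤ x))).length

def pvAltStep (st : List Int × List Int) (x : Int) : List Int × List Int :=
  let p := pvBisectRight st.1 x
  let g' := if p = st.1.length then st.1 ++ [x] else st.1.set p x
  (g', st.2 ++ [(p : Int) + 1])

def longestObstacleCourseAtEachPosition_alt (obstacles : List Int) : List Int :=
  (obstacles.foldl pvAltStep ([], [])).2

-- ===== PRECONDITION & SPEC =====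
def Spec_longestObstacleCourseAtEachPosition (obstacles : List Int) (out : List Int) : Prop := out = longestObstacleCourseAtEachPosition_alt obstacles
instance (obstacles : List Int) (out : List Int) : Decidable (Spec_longestObstacleCourseAtEachPosition obstacles out) := by unfold Spec_longestObstacleCourseAtEachPosition; infer_instance

-- ===== CLAIM (what is proved, stated in full; the proofs are below) =====
def Claim_equal_longestObstacleCourseAtEachPosition : Prop := ∀ (obstacles : List Int), Dom_longestObstacleCourseAtEachPosition obstacles → Spec_longestObstacleCourseAtEachPosition obstacles (longestObstacleCourseAtEachPosition obstacles)

-- ===== LEMMAS AND PROOFS =====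

-- the reference DP, pair list (value, dp-value) built left to right
def pvMaxdp (ps : List (Int × Int)) (y : Int) : Int :=
  ps.foldl (fun m p => if p.1 ≤ y then max m p.2 else m) 0

def pvStep (ps : List (Int × Int)) (x : Int) : List (Int × Int) :=
  ps ++ [(x, pvMaxdp ps x + 1)]

def pvPairs (l : List Int) : List (Int × Int) := l.foldl pvStep []

def pvDpGo (ps : List (Int × Int)) : List Int → List Int
  | [] => []
  | x :: xs => (pvMaxdp ps x + 1) :: pvDpGo (pvStep ps x) xs

lemma pvMaxdp_step (ps : List (Int × Int)) (x y : Int) :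
    pvMaxdp (pvStep ps x) y =
      if x ≤ y then max (pvMaxdp ps y) (pvMaxdp ps x + 1) else pvMaxdp ps y := by
  simp [pvStep, pvMaxdp, List.foldl_append]

lemma pvPairs_snoc (l : List Int) (x : Int) :
    pvPairs (l ++ [x]) = pvStep (pvPairs l) x := by
  simp [pvPairs, List.foldl_append]

lemma pvFold_map_fst (l : List Int) : ∀ ps : List (Int × Int),
    (l.foldl pvStep ps).map Prod.fst = ps.map Prod.fst ++ l := by
  induction l with
  | nil => intro ps; simp
  | cons x xs ih =>
      intro ps
      rw [List.foldl_cons, ih (pvStep ps x)]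
      simp [pvStep]

lemma pvPairs_map_fst (l : List Int) : (pvPairs l).map Prod.fst = l := by
  simpa using pvFold_map_fst l []

lemma pvPairs_length (l : List Int) : (pvPairs l).length = l.length := by
  have := congrArg List.length (pvPairs_map_fst l)
  simpa using this

lemma pvDpGo_eq (l : List Int) : ∀ ps : List (Int × Int),
    (l.foldl pvStep ps).map Prod.snd = ps.map Prod.snd ++ pvDpGo ps l := by
  induction l with
  | nil => intro ps; simp [pvDpGo]
  | cons x xs ih =>
      intro ps
      rw [List.foldl_cons, ih (pvStep ps x)]
      simp [pvDpGo, pvStep]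

lemma pvPairs_map_snd (l : List Int) : (pvPairs l).map Prod.snd = pvDpGo [] l := by
  simpa using pvDpGo_eq l []

lemma pvZip_fst_snd (l : List (Int × Int)) :
    (l.map Prod.fst).zip (l.map Prod.snd) = l := by
  induction l with
  | nil => rfl
  | cons p ps ih => simp [ih]

-- === A-side ===

lemma pvGetD_eq (l : List Int) (m : Nat) (h : m < l.length) (d : Int) :
    PySem.List.pyGetD l (m : Int) d = l[m] := by
  rw [PySem.List.pyGetD_natCast]
  simp [List.getD, List.getElem?_eq_getElem h]

lemma pvGetD_set_self (l : List Int) (i : Nat) (h : i < l.length) (v d : Int) :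
    PySem.List.pyGetD (l.set i v) (i : Int) d = v := by
  rw [PySem.List.pyGetD_natCast]
  simp [List.getD, List.getElem?_set_eq_of_lt v h]

lemma pvGetD_set_ne (l : List Int) (i : Nat) (k : Int) (hk : 0 ≤ k) (hne : k.toNat ≠ i)
    (v d : Int) : PySem.List.pyGetD (l.set i v) k d = PySem.List.pyGetD l k d := by
  have hk' : k = ((k.toNat : Nat) : Int) := by omega
  rw [hk', PySem.List.pyGetD_natCast, PySem.List.pyGetD_natCast]
  simp [List.getD, List.getElem?_set_ne (fun h => hne h.symm)]

lemma pvSetMid (A Z : List Int) (z w : Int) : (A ++ z :: Z).set A.length w = A ++ w :: Z := by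
  induction A with
  | nil => rfl
  | cons a A ih => simp [ih]

lemma pvFoldlCongr {alpha beta : Type} (l : List beta) (f g : alpha → beta → alpha) :
    ∀ (a : alpha), (∀ x ∈ l, ∀ acc, f acc x = g acc x) → l.foldl f a = l.foldl g a := by
  induction l with
  | nil => intro a _; rfl
  | cons x xs ih =>
      intro a h
      simp only [List.foldl_cons]
      rw [h x List.mem_cons_self a]
      exact ih _ (fun z hz => h z (List.mem_cons_of_mem _ hz))

lemma pvGetDMid (A Z : List Int) (z d : Int) : (A ++ z :: Z).getD A.length d = z := by
  induction A with
  | nil => rfl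
  | cons a A ih => simp

lemma pvSetMid' (A Z : List Int) (m : Nat) (h : A.length = m) (z w : Int) :
    (A ++ z :: Z).set m w = A ++ w :: Z := by
  subst h; exact pvSetMid A Z z w

lemma pvZipPairs (l : List Int) : l.zip ((pvPairs l).map Prod.snd) = pvPairs l := by
  have h := pvZip_fst_snd (pvPairs l)
  rw [pvPairs_map_fst] at h
  exact h

lemma pvInnerFold (P : Int → Prop) [DecidablePred P] :
    ∀ (js : List Int) (f : List Int) (i : Nat), i < f.length →
      (∀ j ∈ js, 0 ≤ j ∧ j.toNat ≠ i) →
    (js.foldl (fun f j =>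
        if P j then f.set i (max (PySem.List.pyGetD f (i : Int) 0) (PySem.List.pyGetD f j 0)) else f) f)
      = f.set i (js.foldl (fun a j => if P j then max a (PySem.List.pyGetD f j 0) else a)
          (PySem.List.pyGetD f (i : Int) 0)) := by
  intro js
  induction js with
  | nil =>
      intro f i hi _
      simp only [List.foldl_nil]
      rw [pvGetD_eq f i hi 0]
      exact (List.set_getElem_self hi).symm
  | cons j js ih =>
      intro f i hi hjs
      obtain ⟨hj0, hjne⟩ := hjs j List.mem_cons_self
      have hrest := fun k hk => hjs k (List.mem_cons_of_mem _ hk)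
      by_cases hP : P j
      · simp only [List.foldl_cons, if_pos hP]
        set v := max (PySem.List.pyGetD f (i:Int) 0) (PySem.List.pyGetD f j 0) with hv
        have hlen : i < (f.set i v).length := by simpa using hi
        rw [ih (f.set i v) i hlen hrest]
        rw [List.set_set]
        congr 1
        rw [pvGetD_set_self f i hi v 0]
        exact pvFoldlCongr js _ _ _ (fun k hk acc => by
          rw [pvGetD_set_ne f i k (hrest k hk).1 (hrest k hk).2 v 0])
      · simp only [List.foldl_cons, if_neg hP]
        exact ih f i hi hrest

lemma pvRangeFold_eq (obs fArr : List Int) (x : Int) :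
    ∀ (m : Nat), m ≤ obs.length → m ≤ fArr.length → ∀ (a0 : Int),
    (PySem.List.pyRange 0 (m : Int) 1).foldl
        (fun a j => if PySem.List.pyGetD obs j 0 ≤ x then max a (PySem.List.pyGetD fArr j 0) else a) a0
      = ((obs.take m).zip (fArr.take m)).foldl
          (fun a q => if q.1 ≤ x then max a q.2 else a) a0 := by
  intro m
  induction m with
  | zero => intro _ _ a0; simp [PySem.List.pyRange_one_eq_nil]
  | succ m ih =>
      intro h1 h2 a0
      have hm1 : m ≤ obs.length := by omega
      have hm2 : m ≤ fArr.length := by omega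
      have hcast : ((m+1 : Nat) : Int) = (m : Int) + 1 := by push_cast; ring
      rw [hcast, PySem.List.pyRange_one_succ_right (by exact_mod_cast Nat.zero_le m),
        List.foldl_append, ih hm1 hm2 a0]
      have ho : obs.take (m+1) = obs.take m ++ [obs[m]] := by
        rw [List.take_add_one]; simp [List.getElem?_eq_getElem (show m < obs.length by omega)]
      have hf : fArr.take (m+1) = fArr.take m ++ [fArr[m]] := by
        rw [List.take_add_one]; simp [List.getElem?_eq_getElem (show m < fArr.length by omega)]
      rw [ho, hf, List.zip_append (by simp [List.length_take]; omega), List.foldl_append]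
      simp only [List.foldl_cons, List.foldl_nil]
      rw [pvGetD_eq obs m (by omega) 0, pvGetD_eq fArr m (by omega) 0]
      simp
      rfl

lemma pvOuter (obs : List Int) : ∀ (m : Nat), m ≤ obs.length →
    (PySem.List.pyRange 0 (m : Int) 1).foldl (fun f i =>
      let f1 := (PySem.List.pyRange 0 i 1).foldl (fun f j =>
        if PySem.List.pyGetD obs j 0 ≤ PySem.List.pyGetD obs i 0 then
          f.set i.toNat (max (PySem.List.pyGetD f i 0) (PySem.List.pyGetD f j 0))
        else f) f
      f1.set i.toNat (PySem.List.pyGetD f1 i 0 + 1))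
      (List.replicate obs.length 0)
    = (pvPairs (obs.take m)).map Prod.snd ++ List.replicate (obs.length - m) 0 := by
  intro m
  induction m with
  | zero => intro _; simp [PySem.List.pyRange_one_eq_nil, pvPairs]
  | succ m ih =>
      intro hm
      have hmlt : m < obs.length := by omega
      have hcast : ((m+1 : Nat) : Int) = (m : Int) + 1 := by push_cast; ring
      rw [hcast, PySem.List.pyRange_one_succ_right (by exact_mod_cast Nat.zero_le m),
        List.foldl_append, ih (by omega)]
      simp only [List.foldl_cons, List.foldl_nil]
      set A := (pvPairs (obs.take m)).map Prod.snd with hA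
      have hlenA : A.length = m := by
        simp only [hA, List.length_map, pvPairs_length, List.length_take]; omega
      have hrepc : List.replicate (obs.length - m) (0:Int)
          = 0 :: List.replicate (obs.length - (m+1)) 0 := by
        have : obs.length - m = (obs.length - (m+1)) + 1 := by omega
        rw [this, List.replicate_succ]
      set S := A ++ List.replicate (obs.length - m) (0:Int) with hS
      have hSlen : S.length = obs.length := by
        simp only [hS, List.length_append, List.length_replicate, hlenA]; omega
      have hmS : m < S.length := by omega
      have htoNat : ((m:Int)).toNat = m := by simp
      have hS0 : PySem.List.pyGetD S (m:Int) 0 = 0 := by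
        rw [PySem.List.pyGetD_natCast, hS, hrepc, ← hlenA, pvGetDMid]
      have hcond : ∀ j ∈ PySem.List.pyRange 0 (m:Int) 1, 0 ≤ j ∧ j.toNat ≠ m := by
        intro j hj
        have := (PySem.List.mem_pyRange_one).mp hj
        constructor
        · omega
        · omega
      rw [htoNat, pvInnerFold _ _ S m hmS hcond, hS0]
      rw [pvRangeFold_eq obs S (PySem.List.pyGetD obs (m:Int) 0) m (by omega) (by omega) 0]
      have hTS : S.take m = A := by
        rw [hS, ← hlenA, List.take_left]
      rw [hTS, hA, pvZipPairs]
      have hfold : ((pvPairs (obs.take m)).foldl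
          (fun a p => if p.1 ≤ PySem.List.pyGetD obs (m:Int) 0 then max a p.2 else a) 0)
          = pvMaxdp (pvPairs (obs.take m)) (PySem.List.pyGetD obs (m:Int) 0) := rfl
      rw [hfold]
      rw [pvGetD_set_self S m hmS _ 0, List.set_set]
      have htakes : obs.take (m+1) = obs.take m ++ [obs[m]] := by
        rw [List.take_add_one]; simp [List.getElem?_eq_getElem hmlt]
      rw [htakes, pvPairs_snoc]
      have hmapstep : (pvStep (pvPairs (obs.take m)) obs[m]).map Prod.snd
          = (pvPairs (obs.take m)).map Prod.snd
            ++ [pvMaxdp (pvPairs (obs.take m)) obs[m] + 1] := by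
        simp [pvStep]
      rw [hmapstep]
      have hx : PySem.List.pyGetD obs (m:Int) 0 = obs[m] := pvGetD_eq obs m hmlt 0
      rw [hS, hrepc, pvSetMid' A _ m hlenA]
      rw [hx, hA]
      simp

lemma pvA_eq (obs : List Int) :
    longestObstacleCourseAtEachPosition obs = pvDpGo [] obs := by
  have h := pvOuter obs obs.length le_rfl
  simp only [List.take_length, Nat.sub_self, List.replicate_zero, List.append_nil] at h
  rw [pvPairs_map_snd] at h
  exact h

-- === B-side ===

lemma pvCountTake (y : Int) (L : List Int) (hall : ∀ a ∈ L, a ≤ y) :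
    L.countP (fun t => decide (t ≤ y)) = L.length :=
  List.countP_eq_length.mpr (fun a ha => by simpa using hall a ha)

lemma pvTakeWhile_countP (y : Int) :
    ∀ g : List Int, g.Pairwise (· ≤ ·) →
    (g.takeWhile (fun t => decide (t ≤ y))).length = g.countP (fun t => decide (t ≤ y)) := by
  intro g
  induction g with
  | nil => intro _; rfl
  | cons a g ih =>
      intro hp
      rcases List.pairwise_cons.mp hp with ⟨ha, hg⟩
      by_cases h : a ≤ y
      · simp [h, ih hg]
      · have hz : g.countP (fun t => decide (t ≤ y)) = 0 := by
          rw [List.countP_eq_zero]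
          intro b hb
          simp only [decide_eq_true_eq]
          intro hby; exact h (le_trans (ha b hb) hby)
        simp [h, hz]

lemma pvPreserve (g : List Int) (x : Int) (hs : g.Pairwise (· ≤ ·)) :
    ((if (g.countP (fun t => decide (t ≤ x))) = g.length
        then g ++ [x] else g.set (g.countP (fun t => decide (t ≤ x))) x).Pairwise (· ≤ ·))
    ∧ ∀ y : Int,
      (((if (g.countP (fun t => decide (t ≤ x))) = g.length
          then g ++ [x] else g.set (g.countP (fun t => decide (t ≤ x))) x).countP
            (fun t => decide (t ≤ y)) : Int))
        = (if x ≤ y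
            then max ((g.countP (fun t => decide (t ≤ y)) : Int)) ((g.countP (fun t => decide (t ≤ x)) : Int) + 1)
            else (g.countP (fun t => decide (t ≤ y)) : Int)) := by
  by_cases hcase : (g.countP (fun t => decide (t ≤ x))) = g.length
  · have hall : ∀ a ∈ g, a ≤ x := by
      intro a ha
      have := List.countP_eq_length.mp hcase a ha
      simpa using this
    rw [if_pos hcase]
    constructor
    · refine List.pairwise_append.mpr ⟨hs, List.pairwise_singleton _ _, ?_⟩
      intro a ha b hb
      rcases List.mem_singleton.mp hb with rfl
      exact hall a ha
    · intro y
      rw [List.countP_append]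
      simp only [List.countP_cons, List.countP_nil, decide_eq_true_eq]
      by_cases hxy : x ≤ y
      · have hgy : g.countP (fun t => decide (t ≤ y)) = g.length :=
          pvCountTake y g (fun a ha => le_trans (hall a ha) hxy)
        simp only [if_pos hxy]
        rw [hgy, hcase]
        push_cast
        omega
      · simp only [if_neg hxy]
        push_cast
        omega
  · set p := g.countP (fun t => decide (t ≤ x)) with hp
    have hlt : p < g.length := lt_of_le_of_ne List.countP_le_length hcase
    have htw : (g.takeWhile (fun t => decide (t ≤ x))).length = p := pvTakeWhile_countP x g hs
    have htake : g.takeWhile (fun t => decide (t ≤ x)) = g.take p := by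
      have hpre := List.takeWhile_prefix (l := g) (fun t => decide (t ≤ x))
      rw [List.prefix_iff_eq_take.mp hpre, htw]
    have htakeAll : ∀ a ∈ g.take p, a ≤ x := by
      intro a ha; rw [← htake] at ha
      simpa using List.mem_takeWhile_imp ha
    have hlentake : (g.take p).length = p := by simp [List.length_take]; omega
    have hgp : ¬ g[p] ≤ x := by
      intro hle
      have h1 : g.take (p+1) = g.take p ++ [g[p]] := by
        rw [List.take_add_one]; simp [List.getElem?_eq_getElem hlt]
      have h2 : (g.take (p+1)).countP (fun t => decide (t ≤ x)) = p + 1 := by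
        rw [h1, List.countP_append, pvCountTake x _ htakeAll, hlentake]
        simp [hle]
      have h3 : (g.take (p+1)).countP (fun t => decide (t ≤ x))
          ≤ g.countP (fun t => decide (t ≤ x)) :=
        (List.take_sublist (p+1) g).countP_le
      omega
    have hdec : g = g.take p ++ g[p] :: g.drop (p+1) := by
      conv_lhs => rw [← List.take_append_drop p g]
      rw [List.drop_eq_getElem_cons hlt]
    have hset : g.set p x = g.take p ++ x :: g.drop (p+1) := List.set_eq_take_cons_drop x hlt
    have hsp := hs
    rw [hdec] at hsp
    obtain ⟨hp1, hp2, hp3⟩ := List.pairwise_append.mp hsp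
    have hdropAll : ∀ b ∈ g.drop (p+1), g[p] ≤ b := (List.pairwise_cons.mp hp2).1
    have hdropPW : (g.drop (p+1)).Pairwise (· ≤ ·) := (List.pairwise_cons.mp hp2).2
    have hxltgp : x < g[p] := by omega
    refine ⟨?_, ?_⟩
    · rw [if_neg hcase, hset]
      refine List.pairwise_append.mpr ⟨hp1, ?_, ?_⟩
      · exact List.pairwise_cons.mpr
          ⟨fun b hb => le_trans (le_of_lt hxltgp) (hdropAll b hb), hdropPW⟩
      · intro a ha b hb
        rcases List.mem_cons.mp hb with rfl | hb'
        · exact htakeAll a ha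
        · exact le_trans (htakeAll a ha) (le_trans (le_of_lt hxltgp) (hdropAll b hb'))
    · intro y
      rw [if_neg hcase, hset]
      have hcg : g.countP (fun t => decide (t ≤ y))
          = (g.take p).countP (fun t => decide (t ≤ y))
            + ((if g[p] ≤ y then 1 else 0) + (g.drop (p+1)).countP (fun t => decide (t ≤ y))) := by
        conv_lhs => rw [hdec]
        rw [List.countP_append, List.countP_cons]
        simp only [decide_eq_true_eq]
        omega
      rw [List.countP_append, List.countP_cons]
      simp only [decide_eq_true_eq]
      by_cases hxy : x ≤ y
      · have htp : (g.take p).countP (fun t => decide (t ≤ y)) = p := by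
          rw [pvCountTake y _ (fun a ha => le_trans (htakeAll a ha) hxy), hlentake]
        by_cases hpy : g[p] ≤ y
        · rw [if_pos hxy] at *
          rw [if_pos hpy] at hcg
          rw [if_pos hxy]
          push_cast
          omega
        · have hdz : (g.drop (p+1)).countP (fun t => decide (t ≤ y)) = 0 := by
            rw [List.countP_eq_zero]
            intro b hb
            simp only [decide_eq_true_eq]
            intro hby
            exact hpy (le_trans (hdropAll b hb) hby)
          rw [if_neg hpy] at hcg
          rw [if_pos hxy, if_pos hxy]
          push_cast
          omega
      · have hpy : ¬ g[p] ≤ y := by omega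
        rw [if_neg hpy] at hcg
        rw [if_neg hxy, if_neg hxy]
        push_cast
        omega

lemma pvB_main : ∀ (l : List Int) (g ans : List Int) (ps : List (Int × Int)),
    g.Pairwise (· ≤ ·) →
    (∀ y : Int, (g.countP (fun t => decide (t ≤ y)) : Int) = pvMaxdp ps y) →
    (l.foldl pvAltStep (g, ans)).2 = ans ++ pvDpGo ps l := by
  intro l
  induction l with
  | nil => intro g ans ps _ _; simp [pvDpGo]
  | cons x xs ih =>
      intro g ans ps hs hinv
      have hbr : pvBisectRight g x = g.countP (fun t => decide (t ≤ x)) :=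
        pvTakeWhile_countP x g hs
      obtain ⟨hs', hinv'⟩ := pvPreserve g x hs
      have hstep : pvAltStep (g, ans) x =
          (if (g.countP (fun t => decide (t ≤ x))) = g.length then g ++ [x]
             else g.set (g.countP (fun t => decide (t ≤ x))) x,
           ans ++ [((g.countP (fun t => decide (t ≤ x)) : Nat) : Int) + 1]) := by
        simp only [pvAltStep, hbr]
      rw [List.foldl_cons, hstep]
      have hnew : ∀ y : Int,
          (((if (g.countP (fun t => decide (t ≤ x))) = g.length then g ++ [x]
             else g.set (g.countP (fun t => decide (t ≤ x))) x).countP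
              (fun t => decide (t ≤ y)) : Nat) : Int) = pvMaxdp (pvStep ps x) y := by
        intro y
        rw [hinv' y, pvMaxdp_step, hinv y, hinv x]
      rw [ih _ _ _ hs' hnew]
      have hx : ((g.countP (fun t => decide (t ≤ x)) : Nat) : Int) = pvMaxdp ps x := hinv x
      rw [hx]
      simp [pvDpGo]

lemma pvB_eq (obs : List Int) :
    longestObstacleCourseAtEachPosition_alt obs = pvDpGo [] obs := by
  have h := pvB_main obs [] [] [] (by simp) (by intro y; simp [pvMaxdp])
  simpa [longestObstacleCourseAtEachPosition_alt] using h

-- ===== VERDICT (by name: the statement is the Claim_ definition above) =====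
theorem longestObstacleCourseAtEachPosition_spec : Claim_equal_longestObstacleCourseAtEachPosition := by
  intro obs _
  unfold Spec_longestObstacleCourseAtEachPosition
  rw [pvA_eq, pvB_eq]
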